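-- pv_equiv track=rewrite | github.com/mistryvatsal/YoutubeBot | Logs.py | urlifystring
-- ===== SOURCE A (Python) =====
-- def urlifystring(string):
--     ythomepage = 'https://www.youtube.com/results?search_query='
--     string = ythomepage + string
--     res = ''
--     start = False
--     for char in reversed(string):
--         if char != ' ':
--             start = True
--
--         if char == ' ' and start is True:
--             res += '+'
--         else:
--             res += char
--     return res[::-1]
-- ===== SOURCE B (Python) =====
-- def urlifystring(string):
--     full = 'https://www.youtube.com/results?search_query=' + string
--     body = full.rstrip(' ')          # trailing literal spaces stay untouched, like A
--     return body.replace(' ', '+') + full[len(body):]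
-- ===== Notes on version B (the rewrite author's own statement) =====
-- stated objective: faster
-- what changed: Computes the trailing-space boundary first via rstrip with a space argument, then one library replace on the body with the untouched tail re-appended, instead of A's reversed character-by-character loop with a boolean flag and quadratic string concatenation.
import Mathlib
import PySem

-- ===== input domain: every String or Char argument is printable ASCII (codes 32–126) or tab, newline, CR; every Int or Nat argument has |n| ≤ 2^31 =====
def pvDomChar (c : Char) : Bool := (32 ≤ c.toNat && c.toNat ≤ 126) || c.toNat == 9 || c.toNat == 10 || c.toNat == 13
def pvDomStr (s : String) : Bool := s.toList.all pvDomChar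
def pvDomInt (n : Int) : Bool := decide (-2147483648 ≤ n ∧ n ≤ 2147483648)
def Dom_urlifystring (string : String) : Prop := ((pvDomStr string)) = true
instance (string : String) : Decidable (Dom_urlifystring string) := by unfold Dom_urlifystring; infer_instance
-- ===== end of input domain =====

-- B finds the trailing-space boundary first, then does one library replace on the body;
-- this avoids A's reversed per-character loop with quadratic string concatenation (faster, O(n)).

-- ===== PORT A =====
-- A's loop body as a step function: state = (res, start); res += char is accumulated with ++ [c].
def pvStepA (acc : List Char × Bool) (char : Char) : List Char × Bool :=
  let start := if char ≠ ' ' then true else acc.2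
  if char = ' ' ∧ start = true then (acc.1 ++ ['+'], start) else (acc.1 ++ [char], start)

def urlifystring (string : String) : String :=
  -- string = ythomepage + string (string concatenation, exact on code points)
  let full : List Char := "https://www.youtube.com/results?search_query=".toList ++ string.toList
  -- for char in reversed(string): …
  let p := full.reverse.foldl pvStepA ([], false)
  -- return res[::-1]
  String.ofList p.1.reverse

-- ===== PORT B =====
def urlifystring_alt (string : String) : String :=
  let full : List Char := "https://www.youtube.com/results?search_query=".toList ++ string.toList
  -- full.rstrip(' '): hand port, exact — drop the trailing run of literal spaces only
  let body := (full.reverse.dropWhile (· == ' ')).reverse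
  -- full[len(body):]
  let tail := PySem.List.slice full (some (body.length : Int)) none
  -- body.replace(' ', '+') + tail
  String.ofList (PySem.Chars.replace body [' '] ['+'] ++ tail)

-- ===== PRECONDITION & SPEC =====
def Spec_urlifystring (string : String) (out : String) : Prop := out = urlifystring_alt string
instance (string : String) (out : String) : Decidable (Spec_urlifystring string out) := by unfold Spec_urlifystring; infer_instance

-- ===== CLAIM (what is proved, stated in full; the proofs are below) =====
def Claim_equal_urlifystring : Prop := ∀ (string : String), Dom_urlifystring string → Spec_urlifystring string (urlifystring string)

-- ===== LEMMAS AND PROOFS =====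

def pvG (c : Char) : Char := if c = ' ' then '+' else c

-- Once start = true, A's loop maps every char through pvG.
theorem pvLoopTrue (r res : List Char) :
    (r.foldl pvStepA (res, true)).1 = res ++ r.map pvG := by
  induction r generalizing res with
  | nil => simp
  | cons c t ih =>
    by_cases hc : c = ' ' <;>
      simp [List.foldl_cons, pvStepA, hc, ih, pvG]

-- With start = false, the leading (reversed: trailing) spaces pass through unchanged.
theorem pvLoopFalse (r res : List Char) :
    (r.foldl pvStepA (res, false)).1
      = res ++ r.takeWhile (· == ' ') ++ (r.dropWhile (· == ' ')).map pvG := by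
  induction r generalizing res with
  | nil => simp
  | cons c t ih =>
    by_cases hc : c = ' '
    · simp [List.foldl_cons, pvStepA, hc, ih, List.append_assoc]
    · simp [List.foldl_cons, pvStepA, hc, pvLoopTrue, pvG]

-- Single-char replace is a map (proved on replace's worker with enough fuel).
theorem pvReplaceGo (a : Char) (b : List Char) :
    ∀ (l : List Char) (fuel : Nat) (acc : List Char), l.length ≤ fuel →
      PySem.Chars.replace.go [a] b fuel l acc
        = acc.reverse ++ l.flatMap (fun c => if c = a then b else [c]) := by
  intro l
  induction l with
  | nil =>
    intro fuel acc _
    cases fuel <;> simp [PySem.Chars.replace.go]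
  | cons c t ih =>
    intro fuel acc hf
    cases fuel with
    | zero => simp at hf
    | succ n =>
      by_cases hc : a = c
      · have hp : [a].isPrefixOf (c :: t) = true := by simp [List.isPrefixOf, hc]
        simp [PySem.Chars.replace.go, hc.symm, ih n _ (by simpa using hf),
          List.append_assoc]
      · have hp : [a].isPrefixOf (c :: t) = false := by simp [List.isPrefixOf, hc]
        have hc' : ¬ c = a := fun h => hc h.symm
        simp [PySem.Chars.replace.go, hp, hc', ih n _ (by simpa using hf)]

theorem pvFlatMapMap (l : List Char) :
    l.flatMap (fun c => if c = ' ' then ['+'] else [c]) = l.map pvG := by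
  induction l with
  | nil => rfl
  | cons c t ih => by_cases hc : c = ' ' <;> simp [hc, ih, pvG]

theorem pvReplaceSingle (l : List Char) :
    PySem.Chars.replace l [' '] ['+'] = l.map pvG := by
  rw [PySem.Chars.replace, if_neg (by simp), pvReplaceGo ' ' ['+'] l l.length [] (le_refl _),
    pvFlatMapMap]
  rfl

-- The whole equality, stated over the reversed character list r = full.reverse.
theorem pvMain (r : List Char) :
    (r.foldl pvStepA ([], false)).1.reverse
      = PySem.Chars.replace ((r.dropWhile (· == ' ')).reverse) [' '] ['+']
          ++ PySem.List.slice r.reverse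
              (some (((r.dropWhile (· == ' ')).reverse.length : Nat) : Int)) none := by
  rw [pvLoopFalse, pvReplaceSingle, PySem.List.slice_from_natCast]
  have hsplit : r.reverse
      = (r.dropWhile (· == ' ')).reverse ++ (r.takeWhile (· == ' ')).reverse := by
    conv_lhs => rw [← List.takeWhile_append_dropWhile (p := (· == ' ')) (l := r)]
    simp
  rw [hsplit, List.drop_left]
  simp [List.map_reverse]

-- ===== VERDICT (by name: the statement is the Claim_ definition above) =====
theorem urlifystring_spec : Claim_equal_urlifystring := by
  intro string _
  unfold Spec_urlifystring urlifystring urlifystring_alt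
  have h := pvMain ("https://www.youtube.com/results?search_query=".toList
      ++ string.toList).reverse
  rw [List.reverse_reverse] at h
  simp only [h]
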